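-- pv_equiv track=rewrite | github.com/anarayanan86/MITx-6.00.2x | UNIT 1/Lecture 2 - Decision Trees and Dynamic Programming/Exercise_1.py | yieldAllCombos
-- ===== SOURCE A (Python) =====
-- def yieldAllCombos(items):
--     """
--         Generates all combinations of N items into two bags, whereby each
--         item is in one or zero bags.
--
--         Yields a tuple, (bag1, bag2), where each bag is represented as a list
--         of which item(s) are in each bag.
--     """
--     N = len(items)
--     # enumerate the 3**N possible combinations
--     for i in range(3**N):
--         bag_1 = []
--         bag_2 = []
--         for j in range(N):
--             # test bit jth of integer i
--             if (i // 3**j) % 3 == 0: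
--                 bag_1.append(items[j])
--             elif (i // 3**j) % 3 == 1:
--                 bag_2.append(items[j])
--         yield (bag_1, bag_2)
-- ===== SOURCE B (Python) =====
-- def yieldAllCombos(items):
--     """Recursive decomposition: for each partition of items[1:], place items[0]
--     in bag1, then bag2, then neither (item 0 cycles fastest, matching A's order)."""
--     if not items:
--         yield ([], [])
--         return
--     first = items[0]
--     for b1, b2 in yieldAllCombos(items[1:]):
--         yield ([first] + b1, b2)
--         yield (b1, [first] + b2)
--         yield (b1, b2)
-- ===== Notes on version B (the rewrite author's own statement) =====
-- stated objective: alternative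
-- what changed: Replaced base-3 counter enumeration (decode each of the 3^N indices digit by digit with 3**j exponentiations) by a recursive generator that extends each partition of the tail with the head item placed in bag1, bag2 or neither, sharing tail partitions across all three placements.
import Mathlib
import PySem

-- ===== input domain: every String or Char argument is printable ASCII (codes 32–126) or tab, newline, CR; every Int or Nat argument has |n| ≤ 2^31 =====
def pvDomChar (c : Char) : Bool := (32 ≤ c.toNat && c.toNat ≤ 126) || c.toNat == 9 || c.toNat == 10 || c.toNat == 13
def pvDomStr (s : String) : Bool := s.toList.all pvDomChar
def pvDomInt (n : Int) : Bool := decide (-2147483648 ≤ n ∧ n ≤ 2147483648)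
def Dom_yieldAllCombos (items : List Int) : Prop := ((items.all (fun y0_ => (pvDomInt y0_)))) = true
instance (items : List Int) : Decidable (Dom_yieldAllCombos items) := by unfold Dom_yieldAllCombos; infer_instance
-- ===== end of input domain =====

-- B replaces A's base-3 counter enumeration by a recursive generator that extends
-- each partition of the tail with the head placed in bag1 / bag2 / neither
-- (alternative decomposition, no per-combination digit arithmetic). Both are pure;
-- equivalence is about the yielded sequence, in order.

-- ===== PORT A =====
def yieldAllCombos (items : List Int) : List (List Int × List Int) :=
  (PySem.List.pyRange 0 ((3 : Int) ^ items.length) 1).map (fun i =>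
    (PySem.List.pyRange 0 (items.length : Int) 1).foldl (fun bags j =>
      if PySem.Int.mod (PySem.Int.floordiv i ((3 : Int) ^ j.toNat)) 3 = 0 then
        (bags.1 ++ [PySem.List.pyGetD items j 0], bags.2)
      else if PySem.Int.mod (PySem.Int.floordiv i ((3 : Int) ^ j.toNat)) 3 = 1 then
        (bags.1, bags.2 ++ [PySem.List.pyGetD items j 0])
      else bags) (([] : List Int), ([] : List Int)))

-- ===== PORT B =====
def yieldAllCombos_alt : List Int → List (List Int × List Int)
  | [] => [([], [])]
  | x :: xs =>
      (yieldAllCombos_alt xs).flatMap (fun p => [(x :: p.1, p.2), (p.1, x :: p.2), (p.1, p.2)])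

-- ===== PRECONDITION & SPEC =====
def Spec_yieldAllCombos (items : List Int) (out : List (List Int × List Int)) : Prop := out = yieldAllCombos_alt items
instance (items : List Int) (out : List (List Int × List Int)) : Decidable (Spec_yieldAllCombos items out) := by unfold Spec_yieldAllCombos; infer_instance

-- ===== CLAIM (what is proved, stated in full; the proofs are below) =====
def Claim_equal_yieldAllCombos : Prop := ∀ (items : List Int), Dom_yieldAllCombos items → Spec_yieldAllCombos items (yieldAllCombos items)

-- ===== LEMMAS AND PROOFS =====

-- A's i-th pair, written positionally: bag1 (resp. bag2) collects items[j] for the j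
-- whose base-3 digit of i is 0 (resp. 1).
def pvF (items : List Int) (i : Nat) : List Int × List Int :=
  (((List.range items.length).filter (fun j => (i / 3 ^ j) % 3 == 0)).map (fun j => items.getD j 0),
   ((List.range items.length).filter (fun j => (i / 3 ^ j) % 3 == 1)).map (fun j => items.getD j 0))

-- peeling the least-significant base-3 digit of i
theorem pvF_cons (x : Int) (xs : List Int) (k : Nat) :
    pvF (x :: xs) k =
      ((if k % 3 = 0 then x :: (pvF xs (k / 3)).1 else (pvF xs (k / 3)).1),
       (if k % 3 = 1 then x :: (pvF xs (k / 3)).2 else (pvF xs (k / 3)).2)) := by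
  have hdig : ∀ j : Nat, (k / 3 ^ (j + 1)) % 3 = ((k / 3) / 3 ^ j) % 3 := by
    intro j
    rw [pow_succ']
    rw [Nat.div_div_eq_div_mul]
  simp only [pvF, List.length_cons, List.range_succ_eq_map, List.filter_cons,
    List.filter_map]
  simp only [pow_zero, Nat.div_one, Function.comp_def, Nat.succ_eq_add_one, hdig]
  by_cases h0 : k % 3 = 0 <;> by_cases h1 : k % 3 = 1 <;>
    simp [h0, h1]

-- the inner index loop of A, in Nat form, from an arbitrary accumulator
theorem pvInner (items : List Int) (k : Nat) (b1 b2 : List Int) :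
    (List.range items.length).foldl (fun (bags : List Int × List Int) (j : Nat) =>
        if (k / 3 ^ j) % 3 = 0 then (bags.1 ++ [items.getD j 0], bags.2)
        else if (k / 3 ^ j) % 3 = 1 then (bags.1, bags.2 ++ [items.getD j 0])
        else bags) (b1, b2)
      = (b1 ++ (pvF items k).1, b2 ++ (pvF items k).2) := by
  induction items generalizing k b1 b2 with
  | nil => simp [pvF]
  | cons x xs ih =>
      rw [List.length_cons, List.range_succ_eq_map, List.foldl_cons, List.foldl_map]
      have hdig : ∀ j : Nat, (k / 3 ^ (j + 1)) % 3 = ((k / 3) / 3 ^ j) % 3 := by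
        intro j
        rw [pow_succ']
        rw [Nat.div_div_eq_div_mul]
      have hfun : (fun (bags : List Int × List Int) (j : Nat) =>
          if (k / 3 ^ (j + 1)) % 3 = 0 then (bags.1 ++ [(x :: xs).getD (j+1) 0], bags.2)
          else if (k / 3 ^ (j + 1)) % 3 = 1 then (bags.1, bags.2 ++ [(x :: xs).getD (j+1) 0])
          else bags)
          = (fun (bags : List Int × List Int) (j : Nat) =>
          if ((k / 3) / 3 ^ j) % 3 = 0 then (bags.1 ++ [xs.getD j 0], bags.2)
          else if ((k / 3) / 3 ^ j) % 3 = 1 then (bags.1, bags.2 ++ [xs.getD j 0])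
          else bags) := by
        funext bags j
        simp [hdig j]
      simp only [Nat.succ_eq_add_one, hfun]
      rw [pvF_cons]
      by_cases h0 : k % 3 = 0 <;> by_cases h1 : k % 3 = 1
      · omega
      · simp only [pow_zero, Nat.div_one, h0, if_pos, List.getD_cons_zero]
        rw [ih]
        simp
      · simp only [pow_zero, Nat.div_one, h1, if_pos, List.getD_cons_zero]
        rw [ih]
        simp
      · simp only [pow_zero, Nat.div_one, h0, h1, List.getD_cons_zero]
        rw [ih]
        simp

-- A computes the map of pvF over range(3^N)
theorem pvA_eq (items : List Int) :
    yieldAllCombos items = (List.range (3 ^ items.length)).map (pvF items) := by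
  unfold yieldAllCombos
  rw [PySem.List.pyRange_one, PySem.List.pyRange_one]
  have h3 : (((3 : Int) ^ items.length - 0).toNat) = 3 ^ items.length := by
    rw [sub_zero, show ((3 : Int) ^ items.length) = ((3 ^ items.length : Nat) : Int) by push_cast; ring,
      Int.toNat_natCast]
  have hN : (((items.length : Int) - 0).toNat) = items.length := by simp
  rw [h3, hN, List.map_map]
  refine List.map_congr_left ?_
  intro k hk
  simp only [Function.comp_apply, zero_add]
  rw [List.foldl_map]
  have hfun : (fun (bags : List Int × List Int) (j : Nat) =>
      if PySem.Int.mod (PySem.Int.floordiv (k : Int) ((3 : Int) ^ ((j : Int)).toNat)) 3 = 0 then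
        (bags.1 ++ [PySem.List.pyGetD items ((j : Int)) 0], bags.2)
      else if PySem.Int.mod (PySem.Int.floordiv (k : Int) ((3 : Int) ^ ((j : Int)).toNat)) 3 = 1 then
        (bags.1, bags.2 ++ [PySem.List.pyGetD items ((j : Int)) 0])
      else bags)
      = (fun (bags : List Int × List Int) (j : Nat) =>
        if (k / 3 ^ j) % 3 = 0 then (bags.1 ++ [items.getD j 0], bags.2)
        else if (k / 3 ^ j) % 3 = 1 then (bags.1, bags.2 ++ [items.getD j 0])
        else bags) := by
    funext bags j
    have hpow : ((3 : Int) ^ ((j : Int)).toNat) = ((3 ^ j : Nat) : Int) := by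
      push_cast; simp
    have hm : PySem.Int.mod (((k / 3 ^ j : Nat) : Int)) 3 = (((k / 3 ^ j) % 3 : Nat) : Int) := by
      exact_mod_cast PySem.Int.mod_natCast (k / 3 ^ j) 3
    have hc0 : ((((k / 3 ^ j) % 3 : Nat)) : Int) = 0 ↔ (k / 3 ^ j) % 3 = 0 := by
      exact_mod_cast Iff.rfl
    have hc1 : ((((k / 3 ^ j) % 3 : Nat)) : Int) = 1 ↔ (k / 3 ^ j) % 3 = 1 := by
      exact_mod_cast Iff.rfl
    simp only [hpow, PySem.Int.floordiv_natCast, hm, PySem.List.pyGetD_natCast, hc0, hc1]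
  rw [hfun, pvInner]
  simp only [List.nil_append]

-- grouping range(3*m) into consecutive triples
theorem pvRange_triple (m : Nat) (g : Nat → List Int × List Int) :
    (List.range (3 * m)).map g
      = (List.range m).flatMap (fun q => [g (3 * q), g (3 * q + 1), g (3 * q + 2)]) := by
  induction m with
  | zero => simp
  | succ m ih =>
      have : 3 * (m + 1) = 3 * m + 1 + 1 + 1 := by ring
      rw [this, List.range_succ, List.range_succ, List.range_succ, List.range_succ,
        List.map_append, List.map_append, List.map_append, ih, List.flatMap_append]
      simp

-- B equals the map of pvF over range(3^N)
theorem pvB_eq (items : List Int) :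
    yieldAllCombos_alt items = (List.range (3 ^ items.length)).map (pvF items) := by
  induction items with
  | nil => simp [yieldAllCombos_alt, pvF]
  | cons x xs ih =>
      rw [yieldAllCombos_alt, ih]
      have hpow : 3 ^ (x :: xs).length = 3 * 3 ^ xs.length := by
        rw [List.length_cons, pow_succ']
      rw [hpow, pvRange_triple, List.flatMap_map]
      refine List.flatMap_congr ?_
      intro q hq
      have h0 : pvF (x :: xs) (3 * q) =
          (x :: (pvF xs q).1, (pvF xs q).2) := by
        rw [pvF_cons]
        simp [Nat.mul_mod_right]
      have h1 : pvF (x :: xs) (3 * q + 1) =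
          ((pvF xs q).1, x :: (pvF xs q).2) := by
        rw [pvF_cons]
        have : (3 * q + 1) % 3 = 1 := by omega
        have hd : (3 * q + 1) / 3 = q := by omega
        simp [this, hd]
      have h2 : pvF (x :: xs) (3 * q + 2) =
          ((pvF xs q).1, (pvF xs q).2) := by
        rw [pvF_cons]
        have : (3 * q + 2) % 3 = 2 := by omega
        have hd : (3 * q + 2) / 3 = q := by omega
        simp [this, hd]
      simp [h0, h1, h2]

-- ===== VERDICT (by name: the statement is the Claim_ definition above) =====
theorem yieldAllCombos_spec : Claim_equal_yieldAllCombos := by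
  intro items _
  unfold Spec_yieldAllCombos
  rw [pvA_eq, pvB_eq]
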